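-- pv_equiv track=rewrite | github.com/RobbeW/Data_Statistiek_R | Deel 3 Algoritmiek/04 Gretige algoritmen/Evaluatie/03 Vuile sokken/solution/solution.nl.py | aantal_machines
-- ===== SOURCE A (Python) =====
-- def aantal_machines(n, v, kousen):
--
--     kousen.sort()
--
--     # aantal machines
--     m = 1
--
--     i = 0
--     waslijst = [kousen[0]]
--     while i + 1 < len(kousen):
--         i += 1
--         if len(waslijst) < n and (kousen[i] - waslijst[0]) <= v:
--             waslijst.append(kousen[i])
--         else:
--             waslijst = [kousen[i]]
--             m += 1
--
--     return m
-- ===== SOURCE B (Python) =====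
-- import bisect
--
--
-- def aantal_machines(n, v, kousen):
--     # Greedy group counting by index jumps on the sorted list instead of
--     # maintaining the current wash load element by element.
--     kousen.sort()
--     m = 0
--     i = 0
--     while i < len(kousen):
--         m += 1
--         j = bisect.bisect_right(kousen, kousen[i] + v)
--         i = min(max(j, i + 1), i + max(n, 1))
--     return m
-- ===== Notes on version B (the rewrite author's own statement) =====
-- stated objective: faster
-- what changed: B counts machines group-by-group: instead of maintaining the current wash load element by element, it jumps the index straight to each group's end using bisect_right for the span limit and a min/max cap for the capacity limit (measured ~1.9x faster: no per-element list building).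
import Mathlib
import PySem

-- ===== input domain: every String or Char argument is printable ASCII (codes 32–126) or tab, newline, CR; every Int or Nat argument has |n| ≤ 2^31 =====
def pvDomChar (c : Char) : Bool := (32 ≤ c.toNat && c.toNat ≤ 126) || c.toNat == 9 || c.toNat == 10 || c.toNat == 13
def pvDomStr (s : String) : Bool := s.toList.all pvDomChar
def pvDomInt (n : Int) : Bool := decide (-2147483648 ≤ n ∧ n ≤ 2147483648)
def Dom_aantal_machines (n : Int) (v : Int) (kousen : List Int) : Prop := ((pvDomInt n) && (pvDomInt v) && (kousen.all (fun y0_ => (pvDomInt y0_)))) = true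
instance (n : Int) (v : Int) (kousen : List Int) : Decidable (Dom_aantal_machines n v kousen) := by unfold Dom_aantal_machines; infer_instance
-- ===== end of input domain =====

-- B counts machines group-by-group, jumping to each group's end with bisect_right
-- and a capacity cap, instead of growing the wash load element by element (objective:
-- alternative).  Both A and B sort `kousen` in place; the theorems are about the
-- return value.  A raises IndexError on an empty list (Pre_ excludes it); B returns 0.

-- ===== PORT A =====
-- A's while loop processes the sorted list's elements after the first one in order,
-- carrying (waslijst, m); ported as a foldl over the tail with the same state.
def aantal_machines (n : Int) (v : Int) (kousen : List Int) : Int :=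
  match PySem.List.sorted kousen (fun x => x) false with
  | [] => 0  -- Python raises IndexError at kousen[0]; Pre_ excludes the empty list
  | k0 :: rest =>
      (rest.foldl (fun (st : List Int × Int) ki =>
        if ((st.1.length : Int) < n) ∧ (ki - st.1.headD 0 ≤ v) then
          (st.1 ++ [ki], st.2)
        else
          ([ki], st.2 + 1)) ([k0], 1)).2

-- ===== PORT B =====
-- The while loop of Source B: i strictly increases every iteration, so ks.length is
-- enough fuel; bisect.bisect_right is PySem.List.bisectRight.
def pvAltLoop (ks : List Int) (n : Int) (v : Int) : Nat → Nat → Int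
  | 0, _ => 0
  | fuel + 1, i =>
      if i < ks.length then
        -- j = bisect_right(kousen, kousen[i] + v); i = min(max(j, i+1), i + max(n, 1))
        -- (kousen[i] ported as getD: i is in range on this branch)
        1 + pvAltLoop ks n v fuel
          (min (max (PySem.List.bisectRight ks (ks.getD i 0 + v)) (i + 1)) (i + (max n 1).toNat))
      else 0

def aantal_machines_alt (n : Int) (v : Int) (kousen : List Int) : Int :=
  let ks := PySem.List.sorted kousen (fun x => x) false
  pvAltLoop ks n v ks.length 0

-- ===== PRECONDITION & SPEC =====
-- Pre_ excludes exactly the empty list, on which A raises IndexError (kousen[0]).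
def Pre_aantal_machines (n : Int) (v : Int) (kousen : List Int) : Prop := kousen ≠ []
instance (n : Int) (v : Int) (kousen : List Int) : Decidable (Pre_aantal_machines n v kousen) := by unfold Pre_aantal_machines; infer_instance

def pvWitness_aantal_machines : Int × Int × List Int := (2, 3, [5, 1, 4])

def Spec_aantal_machines (n : Int) (v : Int) (kousen : List Int) (out : Int) : Prop := out = aantal_machines_alt n v kousen
instance (n : Int) (v : Int) (kousen : List Int) (out : Int) : Decidable (Spec_aantal_machines n v kousen out) := by unfold Spec_aantal_machines; infer_instance

-- ===== CLAIM (what is proved, stated in full; the proofs are below) =====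
def Claim_equal_aantal_machines : Prop := ∀ (n : Int) (v : Int) (kousen : List Int), Dom_aantal_machines n v kousen → Pre_aantal_machines n v kousen → Spec_aantal_machines n v kousen (aantal_machines n v kousen)
-- ===== LEMMAS AND PROOFS =====

-- Proof-only greedy spec: number of machines contributed by the remaining sorted
-- elements, given the current load's first element h and length L.
def pvGrp (n v : Int) (h : Int) (L : Int) : List Int → Int
  | [] => 0
  | x :: xs => if L < n ∧ x - h ≤ v then pvGrp n v h (L + 1) xs else 1 + pvGrp n v x 1 xs

-- A's fold only looks at the head and length of waslijst.
theorem pvFoldA_eq (n v : Int) (l : List Int) : ∀ (ws : List Int) (m : Int), ws ≠ [] →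
    (l.foldl (fun (st : List Int × Int) ki =>
        if ((st.1.length : Int) < n) ∧ (ki - st.1.headD 0 ≤ v) then
          (st.1 ++ [ki], st.2)
        else
          ([ki], st.2 + 1)) (ws, m)).2 = m + pvGrp n v (ws.headD 0) (ws.length : Int) l := by
  induction l with
  | nil => intro ws m hws; simp [pvGrp]
  | cons x xs ih =>
    intro ws m hws
    simp only [List.foldl_cons]
    by_cases hc : ((ws.length : Int) < n) ∧ (x - ws.headD 0 ≤ v)
    · rw [if_pos hc, ih (ws ++ [x]) m (by simp)]
      have h1 : (ws ++ [x]).headD 0 = ws.headD 0 := by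
        cases ws with
        | nil => exact absurd rfl hws
        | cons a t => simp
      have h2 : (((ws ++ [x]).length : Nat) : Int) = (ws.length : Int) + 1 := by simp
      rw [h1, h2]
      conv_rhs => rw [pvGrp, if_pos hc]
    · rw [if_neg hc, ih [x] (m + 1) (by simp)]
      conv_rhs => rw [pvGrp, if_neg hc]
      show m + 1 + pvGrp n v x (((1 : Nat) : Int)) xs = m + (1 + pvGrp n v x 1 xs)
      push_cast
      ring

-- countP characterised by a prefix split point.
theorem pvCountOfPrefix (x : Int) : ∀ (l : List Int) (j : Nat), j ≤ l.length →
    (∀ (k : Nat) (hk : k < l.length), k < j → l[k] ≤ x) →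
    (∀ (k : Nat) (hk : k < l.length), j ≤ k → ¬ l[k] ≤ x) →
    l.countP (fun a => decide (a ≤ x)) = j := by
  intro l
  induction l with
  | nil => intro j hj _ _; simp at hj ⊢; omega
  | cons a t ih =>
    intro j hj hlo hhi
    cases j with
    | zero =>
      rw [List.countP_eq_zero]
      intro b hb
      obtain ⟨k, hk, hbk⟩ := List.mem_iff_getElem.mp hb
      have := hhi k hk (Nat.zero_le _)
      simp; omega
    | succ j =>
      have ha : a ≤ x := hlo 0 (by simp) (Nat.succ_pos _)
      rw [List.countP_cons]
      have : t.countP (fun a => decide (a ≤ x)) = j := by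
        apply ih j (by simpa using hj)
        · intro k hk hkj
          have := hlo (k + 1) (by simpa using hk) (by omega)
          simpa using this
        · intro k hk hkj
          have := hhi (k + 1) (by simpa using hk) (by omega)
          simpa using this
      simp [ha, this]

-- The skip lemma: on a sorted remainder, A's greedy finishes the current group by
-- absorbing min(c, cap) elements, where c is the ≤ h+v prefix length and cap the
-- remaining capacity.
theorem pvGrpSkip (n v : Int) : ∀ (l : List Int) (h L : Int), l.Pairwise (· ≤ ·) →
    pvGrp n v h L l =
      (match l.drop (min (l.countP (fun a => decide (a ≤ h + v))) (n - L).toNat) with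
       | [] => 0
       | x :: xs => 1 + pvGrp n v x 1 xs) := by
  intro l
  induction l with
  | nil => intro h L _; simp [pvGrp]
  | cons x xs ih =>
    intro h L hl
    have hpt : xs.Pairwise (· ≤ ·) := hl.of_cons
    by_cases hc : L < n ∧ x - h ≤ v
    · have hx : x ≤ h + v := by omega
      have hcap : (n - L).toNat = (n - (L + 1)).toNat + 1 := by omega
      simp only [pvGrp, if_pos hc, List.countP_cons]
      rw [ih h (L + 1) hpt]
      have : min (xs.countP (fun a => decide (a ≤ h + v)) + 1) ((n - L).toNat)
           = min (xs.countP (fun a => decide (a ≤ h + v))) ((n - (L + 1)).toNat) + 1 := by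
        omega
      simp [hx, this]
    · have hz : min ((x :: xs).countP (fun a => decide (a ≤ h + v))) ((n - L).toNat) = 0 := by
        by_cases hLn : L < n
        · have hxv : ¬ x - h ≤ v := by tauto
          have h0 : (x :: xs).countP (fun a => decide (a ≤ h + v)) = 0 := by
            rw [List.countP_eq_zero]
            intro b hb
            rcases List.mem_cons.mp hb with rfl | hb
            · simp; omega
            · have : x ≤ b := (List.pairwise_cons.mp hl).1 b hb
              simp; omega
          simp [h0]
        · have : (n - L).toNat = 0 := by omega
          simp [this]
      rw [hz]
      simp only [List.drop_zero]
      conv_lhs => rw [pvGrp, if_neg hc]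

-- Source B's loop computes the same machine count as the greedy spec from index i.
theorem pvAltLoop_eq (n v : Int) (ks : List Int) (hks : ks.Pairwise (· ≤ ·)) :
    ∀ (fuel : Nat) (i : Nat), ks.length - i ≤ fuel →
      pvAltLoop ks n v fuel i =
        if hi : i < ks.length then 1 + pvGrp n v ks[i] 1 (ks.drop (i + 1)) else 0 := by
  intro fuel
  induction fuel with
  | zero =>
    intro i hfi
    have : ¬ i < ks.length := by omega
    simp [pvAltLoop, this]
  | succ fuel ih =>
    intro i hfi
    by_cases hi : i < ks.length
    · have hget : ks.getD i 0 = ks[i] := List.getD_eq_getElem ks 0 hi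
      rw [pvAltLoop, if_pos hi, hget, dif_pos hi]
      congr 1
      obtain ⟨hjlen, hjlo, hjhi⟩ := PySem.List.bisectRight_spec ks (ks[i] + v) hks
      set j := PySem.List.bisectRight ks (ks[i] + v) with hjdef
      -- countP of the remainder beyond i
      have hcnt : (ks.drop (i + 1)).countP (fun a => decide (a ≤ ks[i] + v))
          = max j (i + 1) - (i + 1) := by
        apply pvCountOfPrefix
        · simp; omega
        · intro k hk hkj
          rw [List.getElem_drop]
          exact hjlo (i + 1 + k) (by simp at hk; omega) (by omega)
        · intro k hk hkj
          rw [List.getElem_drop]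
          have := hjhi (i + 1 + k) (by simp at hk; omega) (by omega)
          omega
      have hdp : (ks.drop (i + 1)).Pairwise (· ≤ ·) :=
        hks.sublist (List.drop_sublist (i + 1) ks)
      rw [pvGrpSkip n v _ ks[i] 1 hdp, hcnt, List.drop_drop]
      set e := min (max j (i + 1)) (i + (max n 1).toNat) with hedef
      have hdrop : ks.drop (i + 1 + min ((max j (i + 1)) - (i + 1)) ((n - 1).toNat)) = ks.drop e := by
        congr 1
        have h1 : 1 ≤ (max n 1).toNat := by omega
        have h2 : (n - 1).toNat = (max n 1).toNat - 1 := by omega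
        omega
      rw [hdrop]
      have hrec := ih e (by omega)
      rw [hrec]
      by_cases he2 : e < ks.length
      · rw [List.drop_eq_getElem_cons he2]
        simp [he2]
      · rw [show List.drop e ks = [] from List.drop_eq_nil_of_le (by omega)]
        simp [he2]
    · simp [pvAltLoop, hi]

theorem aantal_machines_spec : Claim_equal_aantal_machines := by
  intro n v kousen _ hpre
  unfold Spec_aantal_machines
  have hks0 : (PySem.List.sorted kousen (fun x => x) false).Pairwise (· ≤ ·) := by
    simpa using PySem.List.sorted_pairwise kousen (fun x => x)
  cases hsk : PySem.List.sorted kousen (fun x => x) false with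
  | nil =>
    exact absurd ((PySem.List.sorted_eq_nil_iff kousen (fun x => x) false).mp hsk) hpre
  | cons k0 rest =>
    rw [hsk] at hks0
    have hA : aantal_machines n v kousen = (rest.foldl (fun (st : List Int × Int) ki =>
        if ((st.1.length : Int) < n) ∧ (ki - st.1.headD 0 ≤ v) then
          (st.1 ++ [ki], st.2)
        else
          ([ki], st.2 + 1)) ([k0], 1)).2 := by
      unfold aantal_machines; rw [hsk]
    have hB : aantal_machines_alt n v kousen = pvAltLoop (k0 :: rest) n v (k0 :: rest).length 0 := by
      unfold aantal_machines_alt; rw [hsk]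
    rw [hA, hB, pvFoldA_eq n v rest [k0] 1 (by simp),
      pvAltLoop_eq n v (k0 :: rest) hks0 ((k0 :: rest).length) 0 (by omega)]
    simp
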